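-- pv_equiv track=rewrite | github.com/Sh-Anand/Fast-Generalized-Floyd-Warshall | generator/writer_or_and.py | generate_phase_3_innermost_loop
-- ===== SOURCE A (Python) =====
-- indent8 = "                                "
--
-- indent9 = "                                    "
--
-- counter = 4
--
-- ops = [["_mm256_and_si256", "_mm256_or_si256"]]
--
-- def generate_phase_3_innermost_loop(unroll, op):
--     phase_3_body = ""
--
--     for i in range(unroll):
--         phase_3_body = phase_3_body + indent8 + "jpl"+str(i)+" = (jp + sub_base_l + "+str(i*counter)+");\n"
--
--     phase_3_body = phase_3_body + "\n" + indent8 + "for(; jp <= j + Bj - "+str(unroll*counter)+"; jp += "+str(unroll*counter)+") {\n"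
--
--     for i in range(unroll):
--         id = str(i)
--         phase_3_body = phase_3_body + indent9 + "ipmnjpl"+id+" = ipmn + jpl"+id+";\n"
--
--     for i in range(unroll):
--         id = str(i)
--         phase_3_body = phase_3_body + indent9 + "klnjpl"+id+" = kln + jpl"+id+";\n"
--
--     for i in range(unroll):
--         id = str(i)
--         phase_3_body = phase_3_body + indent9 + "b_v"+id+" = _mm256_load_si256(B + klnjpl"+id+");\n"
--
--     for i in range(unroll):
--         id = str(i)
--         phase_3_body = phase_3_body + indent9 + "c_v"+id+" = _mm256_load_si256(C + ipmnjpl"+id+");\n"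
--
--     for i in range(unroll):
--         id = str(i)
--         phase_3_body = phase_3_body + indent9 + "apb_v"+id+" = "+ops[op][0]+"(a_v, b_v"+id+");\n"
--
--     for i in range(unroll):
--         id = str(i)
--         phase_3_body = phase_3_body + indent9 + "res"+id+" = "+ops[op][1]+"(c_v"+id+", apb_v"+id+");\n"
--
--     for i in range(unroll):
--         id = str(i)
--         phase_3_body = phase_3_body + indent9 + "_mm256_store_si256(C + ipmnjpl"+id+", res"+id+");\n"
--
--     for i in range(unroll):
--         id = str(i)
--         phase_3_body = phase_3_body + indent9 + "jpl"+id+" += "+str(unroll*counter)+";\n"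
--
--     phase_3_body = phase_3_body + indent8 + "}\n"
--     return phase_3_body
-- ===== SOURCE B (Python) =====
-- indent8 = " " * 32
-- indent9 = " " * 36
-- ops = [["_mm256_and_si256", "_mm256_or_si256"]]
--
-- def generate_phase_3_innermost_loop(unroll, op):
--     # Single pass over i: build nine per-template line buffers in parallel,
--     # then concatenate the buffers (instead of nine sequential passes).
--     g = [[] for _ in range(9)]
--     step = str(4 * unroll)
--     i = 0
--     while i < unroll:
--         s = str(i)
--         g[0].append(indent8 + "jpl" + s + " = (jp + sub_base_l + " + str(4 * i) + ");\n")
--         g[1].append(indent9 + "ipmnjpl" + s + " = ipmn + jpl" + s + ";\n")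
--         g[2].append(indent9 + "klnjpl" + s + " = kln + jpl" + s + ";\n")
--         g[3].append(indent9 + "b_v" + s + " = _mm256_load_si256(B + klnjpl" + s + ");\n")
--         g[4].append(indent9 + "c_v" + s + " = _mm256_load_si256(C + ipmnjpl" + s + ");\n")
--         g[5].append(indent9 + "apb_v" + s + " = " + ops[op][0] + "(a_v, b_v" + s + ");\n")
--         g[6].append(indent9 + "res" + s + " = " + ops[op][1] + "(c_v" + s + ", apb_v" + s + ");\n")
--         g[7].append(indent9 + "_mm256_store_si256(C + ipmnjpl" + s + ", res" + s + ");\n")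
--         g[8].append(indent9 + "jpl" + s + " += " + step + ";\n")
--         i += 1
--     header = "\n" + indent8 + "for(; jp <= j + Bj - " + step + "; jp += " + step + ") {\n"
--     out = "".join(g[0]) + header
--     for grp in g[1:]:
--         out += "".join(grp)
--     return out + indent8 + "}\n"
-- ===== Notes on version B (the rewrite author's own statement) =====
-- stated objective: alternative
-- what changed: B makes a single i-major pass over range(unroll) that fills nine per-template line buffers in parallel and concatenates the buffers at the end, instead of A's nine sequential template-major string-accumulation passes.
import Mathlib
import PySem

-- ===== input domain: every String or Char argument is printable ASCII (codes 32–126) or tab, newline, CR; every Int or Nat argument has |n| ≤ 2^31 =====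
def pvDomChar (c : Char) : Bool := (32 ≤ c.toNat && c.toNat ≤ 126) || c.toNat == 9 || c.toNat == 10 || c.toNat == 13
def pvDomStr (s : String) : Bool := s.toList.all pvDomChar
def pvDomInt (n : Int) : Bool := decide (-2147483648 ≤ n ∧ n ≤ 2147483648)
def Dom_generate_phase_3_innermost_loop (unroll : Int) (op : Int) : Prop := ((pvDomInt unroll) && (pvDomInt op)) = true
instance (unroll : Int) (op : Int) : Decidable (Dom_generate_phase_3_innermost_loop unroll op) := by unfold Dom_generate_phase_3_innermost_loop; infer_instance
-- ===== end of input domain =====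

-- B replaces A's nine sequential template-major accumulation passes by one i-major pass
-- filling nine line buffers in parallel, concatenated at the end (objective: alternative).

-- ===== PORT A =====
-- module constants of Source A
def pvIndent8 : String := "                                "
def pvIndent9 : String := "                                    "
def pvOps : List (List String) := [["_mm256_and_si256", "_mm256_or_si256"]]

-- literal transliteration of A: nine foldls over range(unroll), accumulating the string
def generate_phase_3_innermost_loop (unroll : Int) (op : Int) : String :=
  -- ops[op][0] / ops[op][1]; Pre_ guarantees both lookups succeed (Python raises otherwise)
  let row : List String := (PySem.List.pyGet? pvOps op).getD []
  let op0 : String := (PySem.List.pyGet? row 0).getD ""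
  let op1 : String := (PySem.List.pyGet? row 1).getD ""
  let r := PySem.List.pyRange 0 unroll 1
  let b0 := r.foldl (fun s i => s ++ pvIndent8 ++ "jpl" ++ PySem.Int.toStr i ++ " = (jp + sub_base_l + " ++ PySem.Int.toStr (i * 4) ++ ");\n") ""
  let b1 := b0 ++ "\n" ++ pvIndent8 ++ "for(; jp <= j + Bj - " ++ PySem.Int.toStr (unroll * 4) ++ "; jp += " ++ PySem.Int.toStr (unroll * 4) ++ ") {\n"
  let b2 := r.foldl (fun s i => s ++ pvIndent9 ++ "ipmnjpl" ++ PySem.Int.toStr i ++ " = ipmn + jpl" ++ PySem.Int.toStr i ++ ";\n") b1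
  let b3 := r.foldl (fun s i => s ++ pvIndent9 ++ "klnjpl" ++ PySem.Int.toStr i ++ " = kln + jpl" ++ PySem.Int.toStr i ++ ";\n") b2
  let b4 := r.foldl (fun s i => s ++ pvIndent9 ++ "b_v" ++ PySem.Int.toStr i ++ " = _mm256_load_si256(B + klnjpl" ++ PySem.Int.toStr i ++ ");\n") b3
  let b5 := r.foldl (fun s i => s ++ pvIndent9 ++ "c_v" ++ PySem.Int.toStr i ++ " = _mm256_load_si256(C + ipmnjpl" ++ PySem.Int.toStr i ++ ");\n") b4
  let b6 := r.foldl (fun s i => s ++ pvIndent9 ++ "apb_v" ++ PySem.Int.toStr i ++ " = " ++ op0 ++ "(a_v, b_v" ++ PySem.Int.toStr i ++ ");\n") b5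
  let b7 := r.foldl (fun s i => s ++ pvIndent9 ++ "res" ++ PySem.Int.toStr i ++ " = " ++ op1 ++ "(c_v" ++ PySem.Int.toStr i ++ ", apb_v" ++ PySem.Int.toStr i ++ ");\n") b6
  let b8 := r.foldl (fun s i => s ++ pvIndent9 ++ "_mm256_store_si256(C + ipmnjpl" ++ PySem.Int.toStr i ++ ", res" ++ PySem.Int.toStr i ++ ");\n") b7
  let b9 := r.foldl (fun s i => s ++ pvIndent9 ++ "jpl" ++ PySem.Int.toStr i ++ " += " ++ PySem.Int.toStr (unroll * 4) ++ ";\n") b8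
  b9 ++ pvIndent8 ++ "}\n"

-- ===== PORT B =====
-- Source B's module constants " " * 32 and " " * 36
def pvInd8 : String := String.ofList (List.replicate 32 ' ')
def pvInd9 : String := String.ofList (List.replicate 36 ' ')

-- the nine per-i lines (one per template), exactly Source B's append arguments
def pvLine0 (unroll op i : Int) : String := pvInd8 ++ "jpl" ++ PySem.Int.toStr i ++ " = (jp + sub_base_l + " ++ PySem.Int.toStr (4 * i) ++ ");\n"
def pvLine1 (unroll op i : Int) : String := pvInd9 ++ "ipmnjpl" ++ PySem.Int.toStr i ++ " = ipmn + jpl" ++ PySem.Int.toStr i ++ ";\n"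
def pvLine2 (unroll op i : Int) : String := pvInd9 ++ "klnjpl" ++ PySem.Int.toStr i ++ " = kln + jpl" ++ PySem.Int.toStr i ++ ";\n"
def pvLine3 (unroll op i : Int) : String := pvInd9 ++ "b_v" ++ PySem.Int.toStr i ++ " = _mm256_load_si256(B + klnjpl" ++ PySem.Int.toStr i ++ ");\n"
def pvLine4 (unroll op i : Int) : String := pvInd9 ++ "c_v" ++ PySem.Int.toStr i ++ " = _mm256_load_si256(C + ipmnjpl" ++ PySem.Int.toStr i ++ ");\n"
def pvLine5 (unroll op i : Int) : String := pvInd9 ++ "apb_v" ++ PySem.Int.toStr i ++ " = " ++ (PySem.List.pyGet? ((PySem.List.pyGet? pvOps op).getD []) 0).getD "" ++ "(a_v, b_v" ++ PySem.Int.toStr i ++ ");\n"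
def pvLine6 (unroll op i : Int) : String := pvInd9 ++ "res" ++ PySem.Int.toStr i ++ " = " ++ (PySem.List.pyGet? ((PySem.List.pyGet? pvOps op).getD []) 1).getD "" ++ "(c_v" ++ PySem.Int.toStr i ++ ", apb_v" ++ PySem.Int.toStr i ++ ");\n"
def pvLine7 (unroll op i : Int) : String := pvInd9 ++ "_mm256_store_si256(C + ipmnjpl" ++ PySem.Int.toStr i ++ ", res" ++ PySem.Int.toStr i ++ ");\n"
def pvLine8 (unroll op i : Int) : String := pvInd9 ++ "jpl" ++ PySem.Int.toStr i ++ " += " ++ PySem.Int.toStr (4 * unroll) ++ ";\n"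

-- the nine parallel line buffers (Source B's list g of nine lists)
structure PvGroups where
  g0 : List String
  g1 : List String
  g2 : List String
  g3 : List String
  g4 : List String
  g5 : List String
  g6 : List String
  g7 : List String
  g8 : List String
deriving Repr, DecidableEq

-- while-loop body of Source B: append one line to each of the nine buffers
def pvStep (unroll op : Int) (g : PvGroups) (i : Int) : PvGroups :=
  { g0 := g.g0 ++ [pvLine0 unroll op i], g1 := g.g1 ++ [pvLine1 unroll op i],
    g2 := g.g2 ++ [pvLine2 unroll op i], g3 := g.g3 ++ [pvLine3 unroll op i],
    g4 := g.g4 ++ [pvLine4 unroll op i], g5 := g.g5 ++ [pvLine5 unroll op i],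
    g6 := g.g6 ++ [pvLine6 unroll op i], g7 := g.g7 ++ [pvLine7 unroll op i],
    g8 := g.g8 ++ [pvLine8 unroll op i] }

-- "".join(l)
def pvJoin (l : List String) : String := l.foldl (· ++ ·) ""

def generate_phase_3_innermost_loop_alt (unroll : Int) (op : Int) : String :=
  let step := PySem.Int.toStr (4 * unroll)
  let g := (PySem.List.pyRange 0 unroll 1).foldl (pvStep unroll op)
             ⟨[], [], [], [], [], [], [], [], []⟩
  let header := "\n" ++ pvInd8 ++ "for(; jp <= j + Bj - " ++ step ++ "; jp += " ++ step ++ ") {\n"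
  let out := pvJoin g.g0 ++ header
  let out := [g.g1, g.g2, g.g3, g.g4, g.g5, g.g6, g.g7, g.g8].foldl (fun o grp => o ++ pvJoin grp) out
  out ++ pvInd8 ++ "}\n"

-- ===== PRECONDITION & SPEC =====
-- Pre_ excludes exactly the inputs on which A raises IndexError: unroll > 0 with an op that is
-- not a valid index into ops (only 0 and -1 are; for unroll ≤ 0 the lookup is never reached).
def Pre_generate_phase_3_innermost_loop (unroll : Int) (op : Int) : Prop := op = 0 ∨ op = -1 ∨ unroll ≤ 0
instance (unroll : Int) (op : Int) : Decidable (Pre_generate_phase_3_innermost_loop unroll op) := by unfold Pre_generate_phase_3_innermost_loop; infer_instance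
def pvWitness_generate_phase_3_innermost_loop : Int × Int := (2, 0)

def Spec_generate_phase_3_innermost_loop (unroll : Int) (op : Int) (out : String) : Prop := out = generate_phase_3_innermost_loop_alt unroll op
instance (unroll : Int) (op : Int) (out : String) : Decidable (Spec_generate_phase_3_innermost_loop unroll op out) := by unfold Spec_generate_phase_3_innermost_loop; infer_instance

-- ===== CLAIM =====
def Claim_equal_generate_phase_3_innermost_loop : Prop := ∀ (unroll : Int) (op : Int), Dom_generate_phase_3_innermost_loop unroll op → Pre_generate_phase_3_innermost_loop unroll op → Spec_generate_phase_3_innermost_loop unroll op (generate_phase_3_innermost_loop unroll op)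

-- ===== LEMMAS AND PROOFS =====

theorem pvJoin_foldl (t : List String) : ∀ (s₀ : String), t.foldl (· ++ ·) s₀ = s₀ ++ pvJoin t := by
  induction t with
  | nil => intro s₀; simp [pvJoin]
  | cons b t ih =>
    intro s₀
    simp only [pvJoin, List.foldl_cons] at ih ⊢
    rw [ih, ih ("" ++ b)]
    simp [String.append_assoc]

theorem pvCat_lemma (f : Int → String) (l : List Int) : ∀ (s₀ : String),
    l.foldl (fun s i => s ++ f i) s₀ = s₀ ++ pvJoin (l.map f) := by
  induction l with
  | nil => intro s₀; simp [pvJoin]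
  | cons a t ih =>
    intro s₀
    simp only [List.foldl_cons, List.map_cons]
    rw [ih]
    have h : pvJoin (f a :: List.map f t) = "" ++ f a ++ pvJoin (List.map f t) := by
      simp only [pvJoin, List.foldl_cons]
      rw [pvJoin_foldl (List.map f t) ("" ++ f a)]
      simp only [pvJoin]
    rw [h]
    simp [String.append_assoc]

theorem pvStep_spec (unroll op : Int) (r : List Int) : ∀ (g : PvGroups),
    r.foldl (pvStep unroll op) g =
      { g0 := g.g0 ++ r.map (pvLine0 unroll op), g1 := g.g1 ++ r.map (pvLine1 unroll op),
        g2 := g.g2 ++ r.map (pvLine2 unroll op), g3 := g.g3 ++ r.map (pvLine3 unroll op),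
        g4 := g.g4 ++ r.map (pvLine4 unroll op), g5 := g.g5 ++ r.map (pvLine5 unroll op),
        g6 := g.g6 ++ r.map (pvLine6 unroll op), g7 := g.g7 ++ r.map (pvLine7 unroll op),
        g8 := g.g8 ++ r.map (pvLine8 unroll op) } := by
  induction r with
  | nil => intro g; simp
  | cons a t ih =>
    intro g
    simp only [List.foldl_cons, List.map_cons, ih, pvStep, List.append_assoc,
      List.singleton_append]

-- ===== VERDICT =====
theorem generate_phase_3_innermost_loop_spec : Claim_equal_generate_phase_3_innermost_loop := by
  intro unroll op _ _
  unfold Spec_generate_phase_3_innermost_loop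
  unfold generate_phase_3_innermost_loop generate_phase_3_innermost_loop_alt
  have hmul : ∀ i : Int, i * 4 = 4 * i := fun i => Int.mul_comm i 4
  have h8 : pvIndent8 = pvInd8 := by decide
  have h9 : pvIndent9 = pvInd9 := by decide
  have hL0 : pvLine0 unroll op = fun i => pvInd8 ++ "jpl" ++ PySem.Int.toStr i ++ " = (jp + sub_base_l + " ++ PySem.Int.toStr (4 * i) ++ ");\n" := rfl
  have hL1 : pvLine1 unroll op = fun i => pvInd9 ++ "ipmnjpl" ++ PySem.Int.toStr i ++ " = ipmn + jpl" ++ PySem.Int.toStr i ++ ";\n" := rfl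
  have hL2 : pvLine2 unroll op = fun i => pvInd9 ++ "klnjpl" ++ PySem.Int.toStr i ++ " = kln + jpl" ++ PySem.Int.toStr i ++ ";\n" := rfl
  have hL3 : pvLine3 unroll op = fun i => pvInd9 ++ "b_v" ++ PySem.Int.toStr i ++ " = _mm256_load_si256(B + klnjpl" ++ PySem.Int.toStr i ++ ");\n" := rfl
  have hL4 : pvLine4 unroll op = fun i => pvInd9 ++ "c_v" ++ PySem.Int.toStr i ++ " = _mm256_load_si256(C + ipmnjpl" ++ PySem.Int.toStr i ++ ");\n" := rfl
  have hL5 : pvLine5 unroll op = fun i => pvInd9 ++ "apb_v" ++ PySem.Int.toStr i ++ " = " ++ (PySem.List.pyGet? ((PySem.List.pyGet? pvOps op).getD []) 0).getD "" ++ "(a_v, b_v" ++ PySem.Int.toStr i ++ ");\n" := rfl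
  have hL6 : pvLine6 unroll op = fun i => pvInd9 ++ "res" ++ PySem.Int.toStr i ++ " = " ++ (PySem.List.pyGet? ((PySem.List.pyGet? pvOps op).getD []) 1).getD "" ++ "(c_v" ++ PySem.Int.toStr i ++ ", apb_v" ++ PySem.Int.toStr i ++ ");\n" := rfl
  have hL7 : pvLine7 unroll op = fun i => pvInd9 ++ "_mm256_store_si256(C + ipmnjpl" ++ PySem.Int.toStr i ++ ", res" ++ PySem.Int.toStr i ++ ");\n" := rfl
  have hL8 : pvLine8 unroll op = fun i => pvInd9 ++ "jpl" ++ PySem.Int.toStr i ++ " += " ++ PySem.Int.toStr (4 * unroll) ++ ";\n" := rfl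
  simp only [hmul, h8, h9, pvStep_spec, List.nil_append, List.foldl_cons, List.foldl_nil,
    pvCat_lemma, hL0, hL1, hL2, hL3, hL4, hL5, hL6, hL7, hL8,
    String.append_assoc, String.empty_append]
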